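-- pv_equiv track=rewrite | github.com/boon-code/pfrinc3 | src/pfinfo.py | __correct_msg
-- ===== SOURCE A (Python) =====
-- def __correct_msg(msg):
-- 	"checks if message has right format, returns valid message."
--
-- 	l = 'l'
-- 	data = []
-- 	for i in msg:
-- 		if l == '\n' and i == '\n':
-- 			pass
-- 		else:
-- 			data.append(i)
-- 			l = i
--
-- 	return ("".join(data)).strip('\n')
-- ===== SOURCE B (Python) =====
-- def __correct_msg(msg):
-- 	"checks if message has right format, returns valid message."
-- 	return '\n'.join(s for s in msg.split('\n') if s)
-- ===== Notes on version B (the rewrite author's own statement) =====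
-- stated objective: simpler
-- what changed: Replaces the stateful char-by-char loop (tracking the previous character) plus final strip('\n') with a one-liner: split on '\n', drop empty segments, rejoin with '\n'.
import Mathlib
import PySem

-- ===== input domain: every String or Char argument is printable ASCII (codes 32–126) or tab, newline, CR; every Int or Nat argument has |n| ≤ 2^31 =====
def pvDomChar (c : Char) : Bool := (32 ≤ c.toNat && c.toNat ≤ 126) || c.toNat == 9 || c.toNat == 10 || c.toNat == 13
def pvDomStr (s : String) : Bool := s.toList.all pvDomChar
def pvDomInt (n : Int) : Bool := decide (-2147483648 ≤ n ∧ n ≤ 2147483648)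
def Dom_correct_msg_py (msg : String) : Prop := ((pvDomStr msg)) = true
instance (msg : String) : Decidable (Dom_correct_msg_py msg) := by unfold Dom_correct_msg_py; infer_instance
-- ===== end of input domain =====

-- B replaces A's stateful previous-character collapse loop + final strip('\n') by
-- split-on-'\n' / drop empty segments / rejoin — simpler, same O(n) cost.

-- ===== PORT A =====
-- l = 'l'; data = []; for i in msg: if l=='\n' and i=='\n': pass else: data.append(i); l = i
-- return ("".join(data)).strip('\n')
def correct_msg_py (msg : String) : String :=
  let r := msg.toList.foldl
    (fun (st : Char × List Char) i =>
      if st.1 == '\n' && i == '\n' then st else (i, st.2 ++ [i]))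
    ('l', [])
  PySem.Str.stripChars (String.ofList r.2) "\n"

-- ===== PORT B =====
-- return '\n'.join(s for s in msg.split('\n') if s)
def correct_msg_py_alt (msg : String) : String :=
  let parts := PySem.Chars.splitOn msg.toList ['\n']
  String.ofList (PySem.Chars.join ['\n'] (parts.filter (fun s => !s.isEmpty)))

-- ===== PRECONDITION & SPEC =====
def Spec_correct_msg_py (msg : String) (out : String) : Prop := out = correct_msg_py_alt msg
instance (msg : String) (out : String) : Decidable (Spec_correct_msg_py msg out) := by unfold Spec_correct_msg_py; infer_instance

-- ===== CLAIM (what is proved, stated in full; the proofs are below) =====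
def Claim_equal_correct_msg_py : Prop := ∀ (msg : String), Dom_correct_msg_py msg → Spec_correct_msg_py msg (correct_msg_py msg)

-- ===== LEMMAS AND PROOFS =====

-- the newline test used throughout
def pvQ : Char → Bool := fun c => c == '\n'

-- A's loop as a two-state recursion: the Bool is "last appended char was '\n'"
def pvCollapse : Bool → List Char → List Char
  | _, [] => []
  | b, c :: cs => if b && (c == '\n') then pvCollapse b cs else c :: pvCollapse (c == '\n') cs

theorem pvFoldl_collapse (cs : List Char) : ∀ (l : Char) (data : List Char),
    (cs.foldl (fun (st : Char × List Char) i =>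
        if st.1 == '\n' && i == '\n' then st else (i, st.2 ++ [i])) (l, data)).2
      = data ++ pvCollapse (l == '\n') cs := by
  induction cs with
  | nil => intro l data; simp [pvCollapse]
  | cons c cs ih =>
    intro l data
    simp only [List.foldl_cons]
    by_cases h1 : l = '\n' <;> by_cases h2 : c = '\n'
    · subst h1; subst h2
      rw [if_pos (by simp), ih]
      simp [pvCollapse]
    · subst h1
      rw [if_neg (by simp [h2]), ih]
      simp [pvCollapse, h2]
    · subst h2
      rw [if_neg (by simp [h1]), ih]
      simp [pvCollapse, h1]
    · rw [if_neg (by simp [h1]), ih]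
      simp [pvCollapse, h1, h2]

theorem pvCollapse_true (cs : List Char) :
    pvCollapse true cs = pvCollapse false (cs.dropWhile pvQ) := by
  induction cs with
  | nil => rfl
  | cons c cs ih =>
    by_cases h : c = '\n' <;> simp [pvCollapse, pvQ, h, ih]

theorem pvDropWhile_head_false {z : List Char} {b : Char} {r : List Char}
    (h : z.dropWhile pvQ = b :: r) : pvQ b = false := by
  induction z with
  | nil => simp at h
  | cons c cs ih =>
    by_cases hc : pvQ c = true
    · rw [List.dropWhile_cons_of_pos hc] at h; exact ih h
    · rw [List.dropWhile_cons_of_neg hc] at h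
      cases h; simpa using hc

-- trailing strip drops through a non-newline head char
theorem pvRstrip_cons_false (c : Char) (y : List Char) (h : pvQ c = false) :
    (List.dropWhile pvQ (c :: y).reverse).reverse
      = c :: (List.dropWhile pvQ y.reverse).reverse := by
  rw [List.reverse_cons, List.dropWhile_append]
  by_cases hy : List.dropWhile pvQ y.reverse = []
  · rw [if_pos (by simp [hy])]
    rw [List.dropWhile_cons_of_neg (by simp [h])]
    simp [hy]
  · rw [if_neg (by simp [hy])]
    simp

theorem pvRstrip_cons_nl (y : List Char) (hy : List.dropWhile pvQ y.reverse ≠ []) :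
    (List.dropWhile pvQ (('\n') :: y).reverse).reverse
      = '\n' :: (List.dropWhile pvQ y.reverse).reverse := by
  rw [List.reverse_cons, List.dropWhile_append]
  simp [hy]

theorem pvRstrip_cons_nl_empty (y : List Char) (hy : List.dropWhile pvQ y.reverse = []) :
    (List.dropWhile pvQ (('\n') :: y).reverse).reverse = [] := by
  rw [List.reverse_cons, List.dropWhile_append]
  simp [hy, pvQ]

-- leading newlines only contribute empty segments, which the filter drops
theorem pvFilter_splitOnP_dropWhile (z : List Char) :
    ((z.dropWhile pvQ).splitOnP pvQ).filter (fun s => !s.isEmpty)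
      = (z.splitOnP pvQ).filter (fun s => !s.isEmpty) := by
  induction z with
  | nil => rfl
  | cons c cs ih =>
    by_cases h : pvQ c = true
    · rw [List.dropWhile_cons_of_pos h, List.splitOnP_cons, if_pos h, ih]
      simp
    · rw [List.dropWhile_cons_of_neg h]

-- main invariant: right-stripping A's collapsed output yields the head segment followed
-- by '\n'-prefixed nonempty remaining segments
theorem pvMain : ∀ (n : Nat) (x : List Char), x.length ≤ n →
    (List.dropWhile pvQ (pvCollapse false x).reverse).reverse
      = (x.splitOnP pvQ).headI
          ++ (((x.splitOnP pvQ).tail).filter (fun s => !s.isEmpty)).flatMap (fun s => '\n' :: s) := by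
  intro n
  induction n with
  | zero =>
    intro x hx
    have : x = [] := List.eq_nil_of_length_eq_zero (Nat.le_zero.mp hx)
    subst this
    simp [pvCollapse, List.splitOnP_nil]
  | succ n ih =>
    intro x hx
    match x with
    | [] => simp [pvCollapse, List.splitOnP_nil]
    | c :: x' =>
      have hx' : x'.length ≤ n := by simp at hx; omega
      by_cases hc : c = '\n'
      · subst hc
        rw [List.splitOnP_cons, if_pos (by simp [pvQ])]
        simp only [List.headI, List.tail]
        rcases hdm : x'.dropWhile pvQ with _ | ⟨b, d''⟩
        · -- the whole input is newlines: A's output is a single '\n', stripped to []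
          have hcol : pvCollapse false ('\n' :: x') = ['\n'] := by
            simp [pvCollapse, pvCollapse_true, hdm]
          rw [hcol]
          rw [show (['\n'] : List Char) = '\n' :: ([] : List Char) from rfl]
          rw [pvRstrip_cons_nl_empty [] (by simp)]
          have hf : (x'.splitOnP pvQ).filter (fun s => !s.isEmpty) = [] := by
            rw [← pvFilter_splitOnP_dropWhile x', hdm]
            simp [List.splitOnP_nil]
          rw [hf]
          simp
        · have hb : pvQ b = false := pvDropWhile_head_false hdm
          have hdlen : (b :: d'').length ≤ n := by
            have h1 := List.length_dropWhile_le pvQ x'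
            rw [hdm] at h1
            omega
          have ihd := ih (b :: d'') hdlen
          obtain ⟨h2, t2, hht⟩ := List.exists_cons_of_ne_nil (List.splitOnP_ne_nil pvQ d'')
          have hsd : (b :: d'').splitOnP pvQ = (b :: h2) :: t2 := by
            rw [List.splitOnP_cons, if_neg (by simpa using hb), hht]
            rfl
          rw [hsd] at ihd
          simp only [List.headI, List.tail] at ihd
          have hcol : pvCollapse false ('\n' :: x') = '\n' :: pvCollapse false (b :: d'') := by
            simp [pvCollapse, pvCollapse_true, hdm]
          have hne : List.dropWhile pvQ (pvCollapse false (b :: d'')).reverse ≠ [] := by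
            intro hemp
            have h0 : (List.dropWhile pvQ (pvCollapse false (b :: d'')).reverse).reverse = [] := by
              rw [hemp]; rfl
            rw [ihd] at h0
            simp at h0
          rw [hcol, pvRstrip_cons_nl _ hne, ihd]
          have hfilt : (x'.splitOnP pvQ).filter (fun s => !s.isEmpty)
              = (b :: h2) :: t2.filter (fun s => !s.isEmpty) := by
            rw [← pvFilter_splitOnP_dropWhile x', hdm, hsd]
            simp
          rw [hfilt]
          simp
      · -- non-newline head: both sides keep c in front
        have hcq : pvQ c = false := by simp [pvQ, hc]
        have hcol : pvCollapse false (c :: x') = c :: pvCollapse false x' := by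
          have hbe : (c == '\n') = false := by simpa [pvQ] using hcq
          simp [pvCollapse, hbe]
        obtain ⟨h1, t1, hht⟩ := List.exists_cons_of_ne_nil (List.splitOnP_ne_nil pvQ x')
        have hsplit : (c :: x').splitOnP pvQ = (c :: h1) :: t1 := by
          rw [List.splitOnP_cons, if_neg (by simpa using hcq), hht]
          rfl
        have ihx := ih x' hx'
        rw [hht] at ihx
        simp only [List.headI, List.tail] at ihx
        rw [hcol, pvRstrip_cons_false c _ hcq, ihx, hsplit]
        simp only [List.headI, List.tail]
        simp

-- the B side: PySem's fuel-based split agrees with List.splitOnP for a one-char separator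
theorem pvSplitOn_go_spec (c : Char) : ∀ (fuel : Nat) (l cur : List Char) (acc : List (List Char)),
    l.length < fuel →
    PySem.Chars.splitOn.go [c] fuel l cur acc
      = acc.reverse ++ (l.splitOnP (fun ch => ch == c)).modifyHead (fun s => cur.reverse ++ s) := by
  intro fuel
  induction fuel with
  | zero => intro l cur acc h; omega
  | succ fuel ih =>
    intro l cur acc h
    match l with
    | [] =>
      simp [PySem.Chars.splitOn.go, List.splitOnP_nil]
    | ch :: rest =>
      have hpre : ([c].isPrefixOf (ch :: rest)) = (c == ch) := by
        simp [List.isPrefixOf]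
      by_cases hcc : c = ch
      · subst hcc
        have : [c].isPrefixOf (c :: rest) = true := by simp [hpre]
        rw [show PySem.Chars.splitOn.go [c] (fuel+1) (c :: rest) cur acc
              = PySem.Chars.splitOn.go [c] fuel (List.drop ([c] : List Char).length (c :: rest)) [] (cur.reverse :: acc) by
            simp [PySem.Chars.splitOn.go, this]]
        have hlen : rest.length < fuel := by simpa using h
        rw [show List.drop ([c] : List Char).length (c :: rest) = rest by simp]
        rw [ih rest [] (cur.reverse :: acc) hlen]
        rw [List.splitOnP_cons]
        simp [show (fun s : List Char => s) = (id : List Char → List Char) from rfl]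
      · have hne : [c].isPrefixOf (ch :: rest) = false := by
          simp [hpre]; exact fun h' => hcc h'
        rw [show PySem.Chars.splitOn.go [c] (fuel+1) (ch :: rest) cur acc
              = PySem.Chars.splitOn.go [c] fuel rest (ch :: cur) acc by
            simp [PySem.Chars.splitOn.go, hne]]
        have hlen : rest.length < fuel := by simpa using Nat.lt_succ_iff.mp (Nat.lt_of_lt_of_le (by simp) h)
        rw [ih rest (ch :: cur) acc hlen]
        rw [List.splitOnP_cons, if_neg (by simp; exact fun h' => hcc h'.symm)]
        obtain ⟨h1, t1, hht⟩ := List.exists_cons_of_ne_nil (List.splitOnP_ne_nil (fun ch => ch == c) rest)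
        rw [hht]
        simp

theorem pvSplitOn_eq (cs : List Char) (c : Char) :
    PySem.Chars.splitOn cs [c] = cs.splitOnP (fun ch => ch == c) := by
  show PySem.Chars.splitOn.go [c] (cs.length + 1) cs [] [] = _
  rw [pvSplitOn_go_spec c (cs.length + 1) cs [] [] (by omega)]
  obtain ⟨h1, t1, hht⟩ := List.exists_cons_of_ne_nil (List.splitOnP_ne_nil (fun ch => ch == c) cs)
  rw [hht]; simp

-- ['\n'].intercalate over a nonempty list of segments
theorem pvIntercalate_cons (r : List (List Char)) : ∀ (h : List Char),
    (['\n'] : List Char).intercalate (h :: r) = h ++ r.flatMap (fun s => '\n' :: s) := by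
  induction r with
  | nil => intro h; simp [List.intercalate]
  | cons r0 r' ih =>
    intro h
    rw [show (['\n'] : List Char).intercalate (h :: r0 :: r')
          = h ++ ['\n'] ++ (['\n'] : List Char).intercalate (r0 :: r') by
        simp [List.intercalate, List.intersperse]]
    rw [ih r0]
    simp

-- lstrip commutes: leading strip of the collapsed output = collapse of the dropWhile'd input
theorem pvLstrip_collapse (cs : List Char) :
    List.dropWhile pvQ (pvCollapse false cs) = pvCollapse false (cs.dropWhile pvQ) := by
  cases cs with
  | nil => rfl
  | cons c cs' =>
    by_cases h : c = '\n'
    · subst h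
      have : pvCollapse false ('\n' :: cs') = '\n' :: pvCollapse false (cs'.dropWhile pvQ) := by
        simp [pvCollapse, pvCollapse_true]
      rw [this]
      rw [List.dropWhile_cons_of_pos (by simp [pvQ])]
      rw [show ('\n' :: cs').dropWhile pvQ = cs'.dropWhile pvQ by
        rw [List.dropWhile_cons_of_pos (by simp [pvQ])]]
      match hdm : cs'.dropWhile pvQ with
      | [] => simp [pvCollapse]
      | b :: d'' =>
        have hb : pvQ b = false := pvDropWhile_head_false (z := cs') hdm
        have : pvCollapse false (b :: d'') = b :: pvCollapse false d'' := by
          have hbe : (b == '\n') = false := by simpa [pvQ] using hb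
          simp [pvCollapse, hbe]
        rw [this, List.dropWhile_cons_of_neg (by simpa [pvQ] using hb)]
    · have hcq : (c == '\n') = false := by simp [h]
      have : pvCollapse false (c :: cs') = c :: pvCollapse false cs' := by
        simp [pvCollapse, hcq]
      rw [this, List.dropWhile_cons_of_neg (by simpa [pvQ] using hcq),
          List.dropWhile_cons_of_neg (by simpa [pvQ] using hcq)]
      exact this.symm

-- stripChars with chars = "\n" is lstrip-then-rstrip with the pvQ predicate
theorem pvStripChars_eq (s : List Char) :
    PySem.Chars.stripChars s ['\n']
      = (List.dropWhile pvQ (List.dropWhile pvQ s).reverse).reverse := by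
  have hp : (fun c => (['\n'] : List Char).contains c) = pvQ := by
    funext c
    show ((['\n'] : List Char).contains c) = (c == '\n')
    simp only [List.contains_cons]
    simp
  simp only [PySem.Chars.stripChars, hp]

-- ===== VERDICT (by name: the statement is the Claim_ definition above) =====
theorem correct_msg_py_spec : Claim_equal_correct_msg_py := by
  intro msg _
  unfold Spec_correct_msg_py correct_msg_py correct_msg_py_alt
  apply String.toList_inj.mp
  rw [PySem.Str.toList_stripChars]
  have hfold : (String.ofList ((msg.toList.foldl
      (fun (st : Char × List Char) i =>
        if st.1 == '\n' && i == '\n' then st else (i, st.2 ++ [i])) ('l', [])).2)).toList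
      = pvCollapse false msg.toList := by
    rw [String.toList_ofList, pvFoldl_collapse msg.toList 'l' []]
    simp
  rw [hfold]
  rw [show ("\n" : String).toList = ['\n'] from rfl]
  rw [pvStripChars_eq, pvLstrip_collapse, String.toList_ofList]
  rw [pvSplitOn_eq msg.toList '\n']
  show (List.dropWhile pvQ (pvCollapse false (msg.toList.dropWhile pvQ)).reverse).reverse
      = PySem.Chars.join ['\n'] ((msg.toList.splitOnP pvQ).filter (fun s => !s.isEmpty))
  rw [pvMain (msg.toList.dropWhile pvQ).length _ (le_refl _)]
  rw [show (msg.toList.splitOnP pvQ).filter (fun s => !s.isEmpty)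
        = ((msg.toList.dropWhile pvQ).splitOnP pvQ).filter (fun s => !s.isEmpty) from
      (pvFilter_splitOnP_dropWhile msg.toList).symm]
  rcases hdm : msg.toList.dropWhile pvQ with _ | ⟨b, d''⟩
  · simp [List.splitOnP_nil, PySem.Chars.join, List.intercalate]
  · have hb : pvQ b = false := pvDropWhile_head_false hdm
    obtain ⟨h2, t2, hht⟩ := List.exists_cons_of_ne_nil (List.splitOnP_ne_nil pvQ d'')
    have hsd : (b :: d'').splitOnP pvQ = (b :: h2) :: t2 := by
      rw [List.splitOnP_cons, if_neg (by simpa using hb), hht]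
      rfl
    rw [hsd]
    simp only [List.headI, List.tail]
    rw [show ((b :: h2) :: t2).filter (fun s => !s.isEmpty)
          = (b :: h2) :: t2.filter (fun s => !s.isEmpty) by simp]
    show _ = (['\n'] : List Char).intercalate _
    rw [pvIntercalate_cons]
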